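-- pv_equiv track=rewrite | github.com/w772552092/DataMiningCompetitionCode | data_process.py | sliding_window_5
-- ===== SOURCE A (Python) =====
-- def sliding_window_5(arr):
--     """滑动窗口大小为5的逻辑"""
--     window_size = 5
--     modified_arr = arr.copy()
--     for i in range(len(arr) - window_size + 1):
--         window = arr[i:i + window_size]
--         if window[1] < 10 and window[2] < 10 and window[3] < 10 and window[0] > 10 and window[4] > 10:
--             # 将 window[0] 包装成列表进行赋值
--             modified_arr[i + 1:i + 4] = [window[0]] * 3
--     return modified_arr
-- ===== SOURCE B (Python) =====
-- def _probe(arr, p):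
--     n = len(arr)
--     for i in (p - 1, p - 2, p - 3):
--         if 0 <= i <= n - 5 and arr[i] > 10 and arr[i+1] < 10 and arr[i+2] < 10 and arr[i+3] < 10 and arr[i+4] > 10:
--             return arr[i]
--     return arr[p]
--
-- def sliding_window_5(arr):
--     return [_probe(arr, p) for p in range(len(arr))]
-- ===== Notes on version B (the rewrite author's own statement) =====
-- stated objective: alternative
-- what changed: B rebuilds the result in one position-oriented pass, each output index probing its three candidate window starts backward (p-1, p-2, p-3, largest first), instead of A's forward scan over window starts with in-place slice overwrites.
import Mathlib
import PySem

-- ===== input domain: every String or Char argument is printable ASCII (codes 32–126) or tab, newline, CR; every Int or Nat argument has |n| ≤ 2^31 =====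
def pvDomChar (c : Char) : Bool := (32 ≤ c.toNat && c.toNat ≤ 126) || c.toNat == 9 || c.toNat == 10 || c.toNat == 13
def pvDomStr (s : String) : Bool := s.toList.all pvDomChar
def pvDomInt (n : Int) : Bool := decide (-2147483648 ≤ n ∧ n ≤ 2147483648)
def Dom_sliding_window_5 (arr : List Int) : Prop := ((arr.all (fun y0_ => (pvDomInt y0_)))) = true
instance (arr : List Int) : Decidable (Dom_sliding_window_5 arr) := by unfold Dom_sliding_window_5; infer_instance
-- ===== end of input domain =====

-- B rebuilds the list in one position-oriented pass (each output index probes its three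
-- possible window starts backward) instead of A's forward window scan with slice overwrites;
-- objective: alternative decomposition, same exact values.

-- ===== PORT A =====
-- one loop iteration: window = arr[i:i+5]; conditional slice assignment into the accumulator
def pvWindow (arr : List Int) (i : Nat) : List Int :=
  PySem.List.slice arr (some (i : Int)) (some ((i : Int) + 5))

def pvStepA (arr : List Int) (acc : List Int) (i : Nat) : List Int :=
  match PySem.List.pyGet? (pvWindow arr i) 0, PySem.List.pyGet? (pvWindow arr i) 1,
        PySem.List.pyGet? (pvWindow arr i) 2, PySem.List.pyGet? (pvWindow arr i) 3,
        PySem.List.pyGet? (pvWindow arr i) 4 with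
  | some w0, some w1, some w2, some w3, some w4 =>
      if w1 < 10 ∧ w2 < 10 ∧ w3 < 10 ∧ w0 > 10 ∧ w4 > 10 then
        -- modified_arr[i+1:i+4] = [w0]*3 : bounds are nonnegative and within range here,
        -- so Python's slice assignment is exactly take/append/drop
        acc.take (i + 1) ++ [w0, w0, w0] ++ acc.drop (i + 4)
      else acc
  | _, _, _, _, _ => acc  -- unreachable: every window in range(len(arr)-5+1) has 5 elements

def sliding_window_5 (arr : List Int) : List Int :=
  -- range(len(arr) - 5 + 1): Nat subtraction gives Python's empty range for len(arr) < 5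
  (List.range (arr.length + 1 - 5)).foldl (pvStepA arr) arr

-- ===== PORT B =====
-- qualifying window start: 0 <= i <= len(arr)-5 and the five value tests
-- (arr[i+j] for 0 ≤ i is exactly arr.getD (i.toNat+j) 0 under the bound guard)
def pvQual5 (arr : List Int) (i : Int) : Bool :=
  decide (0 ≤ i) && decide (i ≤ (arr.length : Int) - 5) &&
  decide (arr.getD i.toNat 0 > 10) && decide (arr.getD (i.toNat + 1) 0 < 10) &&
  decide (arr.getD (i.toNat + 2) 0 < 10) && decide (arr.getD (i.toNat + 3) 0 < 10) &&
  decide (arr.getD (i.toNat + 4) 0 > 10)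

-- probe the candidate window starts p-1, p-2, p-3 in order; default arr[p]
def pvProbeB (arr : List Int) (p : Nat) : Int :=
  if pvQual5 arr ((p : Int) - 1) then arr.getD (p - 1) 0
  else if pvQual5 arr ((p : Int) - 2) then arr.getD (p - 2) 0
  else if pvQual5 arr ((p : Int) - 3) then arr.getD (p - 3) 0
  else arr.getD p 0

def sliding_window_5_alt (arr : List Int) : List Int :=
  (List.range arr.length).map (pvProbeB arr)

-- ===== PRECONDITION & SPEC =====
def Spec_sliding_window_5 (arr : List Int) (out : List Int) : Prop := out = sliding_window_5_alt arr
instance (arr : List Int) (out : List Int) : Decidable (Spec_sliding_window_5 arr out) := by unfold Spec_sliding_window_5; infer_instance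

-- ===== CLAIM (what is proved, stated in full; the proofs are below) =====
def Claim_equal_sliding_window_5 : Prop := ∀ (arr : List Int), Dom_sliding_window_5 arr → Spec_sliding_window_5 arr (sliding_window_5 arr)

-- ===== LEMMAS AND PROOFS =====

-- the value A's loop leaves at position p after processing window starts 0..k-1
def pvValA (arr : List Int) (p : Nat) : Nat → Int
  | 0 => arr.getD p 0
  | k + 1 => if pvQual5 arr (k : Int) ∧ k + 1 ≤ p ∧ p ≤ k + 3 then arr.getD k 0
             else pvValA arr p k

lemma pvWindow_get (arr : List Int) (i : Nat) (j : Int) (h5 : i + 5 ≤ arr.length)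
    (hj0 : 0 ≤ j) (hj : j < 5) :
    PySem.List.pyGet? (pvWindow arr i) j = some (arr.getD (i + j.toNat) 0) := by
  have h : ((i : Int) + 5) = ((i : Int) + ((5 : Nat) : Int)) := by push_cast; ring
  unfold pvWindow
  rw [h, PySem.List.slice_natCast_add, PySem.List.pyGet?_of_nonneg _ hj0]
  have hk : j.toNat < 5 := by omega
  rw [List.getElem?_take_of_lt hk, List.getElem?_drop]
  have hin : i + j.toNat < arr.length := by omega
  rw [List.getD_eq_getElem _ _ hin, List.getElem?_eq_getElem hin]

lemma pvAssign_getD (acc : List Int) (w : Int) (k p : Nat) (h : k + 4 ≤ acc.length) :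
    (acc.take (k + 1) ++ [w, w, w] ++ acc.drop (k + 4)).getD p 0 =
      if k + 1 ≤ p ∧ p ≤ k + 3 then w else acc.getD p 0 := by
  have hA : (acc.take (k + 1)).length = k + 1 := by simp; omega
  have hAB : (acc.take (k + 1) ++ [w, w, w]).length = k + 4 := by simp; omega
  simp only [List.getD_eq_getElem?_getD]
  by_cases h1 : p < k + 1
  · rw [if_neg (by omega)]
    rw [List.getElem?_append_left (by omega), List.getElem?_append_left (by omega),
        List.getElem?_take_of_lt h1]
  · by_cases h2 : p ≤ k + 3
    · rw [if_pos (by omega)]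
      rw [List.getElem?_append_left (by omega), List.getElem?_append_right (by omega)]
      have : p = k + 1 ∨ p = k + 2 ∨ p = k + 3 := by omega
      rcases this with rfl | rfl | rfl <;> simp [hA]
    · rw [if_neg (by omega)]
      rw [List.getElem?_append_right (by omega), List.getElem?_drop]
      congr 2
      omega

lemma pvStepA_char (arr acc : List Int) (k : Nat) (hlen : acc.length = arr.length)
    (h5 : k + 5 ≤ arr.length) :
    (pvStepA arr acc k).length = arr.length ∧
    ∀ p, (pvStepA arr acc k).getD p 0 =
      if pvQual5 arr (k : Int) ∧ k + 1 ≤ p ∧ p ≤ k + 3 then arr.getD k 0 else acc.getD p 0 := by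
  have hq : (pvQual5 arr (k : Int) = true) ↔
      (arr.getD (k+1) 0 < 10 ∧ arr.getD (k+2) 0 < 10 ∧ arr.getD (k+3) 0 < 10 ∧
       arr.getD k 0 > 10 ∧ arr.getD (k+4) 0 > 10) := by
    simp only [pvQual5, Int.toNat_natCast, Bool.and_eq_true, decide_eq_true_eq]
    constructor
    · rintro ⟨⟨⟨⟨⟨⟨_, _⟩, h0⟩, h1⟩, h2⟩, h3⟩, h4⟩; exact ⟨h1, h2, h3, h0, h4⟩
    · rintro ⟨h1, h2, h3, h0, h4⟩
      refine ⟨⟨⟨⟨⟨⟨by omega, by omega⟩, h0⟩, h1⟩, h2⟩, h3⟩, h4⟩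
  unfold pvStepA
  rw [pvWindow_get arr k 0 h5 (by norm_num) (by norm_num),
      pvWindow_get arr k 1 h5 (by norm_num) (by norm_num),
      pvWindow_get arr k 2 h5 (by norm_num) (by norm_num),
      pvWindow_get arr k 3 h5 (by norm_num) (by norm_num),
      pvWindow_get arr k 4 h5 (by norm_num) (by norm_num)]
  simp only [Int.toNat_zero, Int.toNat_one, show (2:Int).toNat = 2 from rfl,
    show (3:Int).toNat = 3 from rfl, show (4:Int).toNat = 4 from rfl, Nat.add_zero]
  by_cases hc : arr.getD (k+1) 0 < 10 ∧ arr.getD (k+2) 0 < 10 ∧ arr.getD (k+3) 0 < 10 ∧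
      arr.getD k 0 > 10 ∧ arr.getD (k+4) 0 > 10
  · rw [if_pos hc]
    constructor
    · simp [List.length_take, List.length_drop]; omega
    · intro p
      rw [pvAssign_getD acc (arr.getD k 0) k p (by omega)]
      have hiff : (pvQual5 arr (k : Int) = true ∧ k + 1 ≤ p ∧ p ≤ k + 3) ↔ (k + 1 ≤ p ∧ p ≤ k + 3) := by
        simp [hq.mpr hc]
      rw [if_congr hiff rfl rfl]
  · rw [if_neg hc]
    refine ⟨hlen, fun p => ?_⟩
    rw [if_neg (by rw [hq] at *; tauto)]

lemma pvFoldA_char (arr : List Int) :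
    ∀ k, k ≤ arr.length + 1 - 5 →
    ((List.range k).foldl (pvStepA arr) arr).length = arr.length ∧
    ∀ p, ((List.range k).foldl (pvStepA arr) arr).getD p 0 = pvValA arr p k := by
  intro k
  induction k with
  | zero => intro _; exact ⟨rfl, fun p => rfl⟩
  | succ k ih =>
    intro hk
    have hk' : k ≤ arr.length + 1 - 5 := by omega
    have h5 : k + 5 ≤ arr.length := by omega
    obtain ⟨hlen, hval⟩ := ih hk'
    rw [List.range_succ, List.foldl_append, List.foldl_cons, List.foldl_nil]
    obtain ⟨hl2, hv2⟩ := pvStepA_char arr _ k hlen h5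
    refine ⟨hl2, fun p => ?_⟩
    rw [hv2 p, hval p]
    rfl

lemma pvValA_closed (arr : List Int) (p : Nat) :
    ∀ k, pvValA arr p k =
      if pvQual5 arr ((p : Int) - 1) ∧ (p : Int) - 1 < (k : Int) then arr.getD (p - 1) 0
      else if pvQual5 arr ((p : Int) - 2) ∧ (p : Int) - 2 < (k : Int) then arr.getD (p - 2) 0
      else if pvQual5 arr ((p : Int) - 3) ∧ (p : Int) - 3 < (k : Int) then arr.getD (p - 3) 0
      else arr.getD p 0 := by
  intro k
  induction k with
  | zero =>
    have n1 : ¬ (pvQual5 arr ((p : Int) - 1) ∧ (p : Int) - 1 < ((0:Nat) : Int)) := by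
      rintro ⟨hq, hlt⟩
      simp only [pvQual5, Bool.and_eq_true, decide_eq_true_eq] at hq
      omega
    have n2 : ¬ (pvQual5 arr ((p : Int) - 2) ∧ (p : Int) - 2 < ((0:Nat) : Int)) := by
      rintro ⟨hq, hlt⟩
      simp only [pvQual5, Bool.and_eq_true, decide_eq_true_eq] at hq
      omega
    have n3 : ¬ (pvQual5 arr ((p : Int) - 3) ∧ (p : Int) - 3 < ((0:Nat) : Int)) := by
      rintro ⟨hq, hlt⟩
      simp only [pvQual5, Bool.and_eq_true, decide_eq_true_eq] at hq
      omega
    rw [if_neg n1, if_neg n2, if_neg n3]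
    rfl
  | succ k ih =>
    show (if pvQual5 arr (k : Int) ∧ k + 1 ≤ p ∧ p ≤ k + 3 then arr.getD k 0 else pvValA arr p k) = _
    by_cases hnew : pvQual5 arr (k : Int) ∧ k + 1 ≤ p ∧ p ≤ k + 3
    · rw [if_pos hnew]
      obtain ⟨hq, hp1, hp3⟩ := hnew
      have hcase : p = k + 1 ∨ p = k + 2 ∨ p = k + 3 := by omega
      rcases hcase with rfl | rfl | rfl
      · -- p = k + 1 : first branch fires
        have e1 : ((k+1 : Nat) : Int) - 1 = (k : Int) := by push_cast; ring
        rw [if_pos (by rw [e1]; exact ⟨hq, by push_cast; omega⟩)]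
        congr 1
      · -- p = k + 2 : first branch cannot fire (p-1 = k+1 ≥ k+1), second does
        rw [if_neg (by rintro ⟨_, hlt⟩; push_cast at hlt; omega)]
        have e2 : ((k+2 : Nat) : Int) - 2 = (k : Int) := by push_cast; ring
        rw [if_pos (by rw [e2]; exact ⟨hq, by push_cast; omega⟩)]
        congr 1
      · -- p = k + 3
        rw [if_neg (by rintro ⟨_, hlt⟩; push_cast at hlt; omega),
            if_neg (by rintro ⟨_, hlt⟩; push_cast at hlt; omega)]
        have e3 : ((k+3 : Nat) : Int) - 3 = (k : Int) := by push_cast; ring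
        rw [if_pos (by rw [e3]; exact ⟨hq, by push_cast; omega⟩)]
        congr 1
    · rw [if_neg hnew, ih]
      -- conditions with bound k and k+1 coincide here
      have step : ∀ j : Nat, 1 ≤ j → j ≤ 3 →
          ((pvQual5 arr ((p : Int) - j) ∧ (p : Int) - j < ((k+1 : Nat) : Int)) ↔
           (pvQual5 arr ((p : Int) - j) ∧ (p : Int) - j < (k : Int))) := by
        intro j hj1 hj3
        constructor
        · rintro ⟨hq, hlt⟩
          refine ⟨hq, ?_⟩
          by_contra hge
          have he : (p : Int) - j = (k : Int) := by push_cast at hlt ⊢; omega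
          have : pvQual5 arr (k : Int) ∧ k + 1 ≤ p ∧ p ≤ k + 3 := by
            refine ⟨by rwa [he] at hq, by omega, by omega⟩
          exact hnew this
        · rintro ⟨hq, hlt⟩
          exact ⟨hq, by push_cast at hlt ⊢; omega⟩
      have s1 := step 1 (by omega) (by omega)
      have s2 := step 2 (by omega) (by omega)
      have s3 := step 3 (by omega) (by omega)
      push_cast at s1 s2 s3 ⊢
      rw [if_congr s1 rfl rfl, if_congr s2 rfl (if_congr s3 rfl rfl)]

lemma pvProbeB_eq_valA (arr : List Int) (p : Nat) :
    pvProbeB arr p = pvValA arr p (arr.length + 1 - 5) := by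
  rw [pvValA_closed]
  have bound : ∀ i : Int, pvQual5 arr i → i < ((arr.length - 4 : Nat) : Int) := by
    intro i hq
    simp only [pvQual5, Bool.and_eq_true, decide_eq_true_eq] at hq
    omega
  unfold pvProbeB
  by_cases h1 : pvQual5 arr ((p : Int) - 1)
  · simp [h1, bound _ h1]
  · by_cases h2 : pvQual5 arr ((p : Int) - 2)
    · simp [h1, h2, bound _ h2]
    · by_cases h3 : pvQual5 arr ((p : Int) - 3)
      · simp [h1, h2, h3, bound _ h3]
      · simp [h1, h2, h3]

-- ===== VERDICT (by name: the statement is the Claim_ definition above) =====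
theorem sliding_window_5_spec : Claim_equal_sliding_window_5 := by
  intro arr _
  unfold Spec_sliding_window_5
  obtain ⟨hlen, hval⟩ := pvFoldA_char arr (arr.length + 1 - 5) le_rfl
  show (List.range (arr.length + 1 - 5)).foldl (pvStepA arr) arr
      = (List.range arr.length).map (pvProbeB arr)
  apply List.ext_getElem
  · rw [List.length_map, List.length_range]; exact hlen
  · intro p hp hp'
    rw [List.getElem_map, List.getElem_range, pvProbeB_eq_valA, ← hval p,
        List.getD_eq_getElem _ _ hp]
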